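-- pv_equiv track=rewrite | github.com/ishandutta2007/codeforces | marckess/normal/373/B.py | f
-- ===== SOURCE A (Python) =====
-- def f (k, m):
-- 	x, s, res = 1, 1, 0
-- 	while x <= m:
-- 		if x * 10 - 1 <= m:
-- 			res += k * s * (x * 10 - x)
-- 		else:
-- 			res += k * s * (m - x + 1)
-- 		s += 1
-- 		x *= 10
-- 	return res
-- ===== SOURCE B (Python) =====
-- def f(k, m):
--     if m < 1:
--         return 0
--     d, p = 1, 10
--     while p <= m:
--         d += 1
--         p *= 10
--     return k * ((m + 1) * d - (p - 1) // 9)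
-- ===== Notes on version B (the rewrite author's own statement) =====
-- stated objective: simpler
-- what changed: Replaces A's decade-by-decade accumulation of weighted digit-block sums with a short loop that only finds the digit count d (and power p = 10^d) of m and then returns the closed form k*((m+1)*d - (p-1)//9).
import Mathlib
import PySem

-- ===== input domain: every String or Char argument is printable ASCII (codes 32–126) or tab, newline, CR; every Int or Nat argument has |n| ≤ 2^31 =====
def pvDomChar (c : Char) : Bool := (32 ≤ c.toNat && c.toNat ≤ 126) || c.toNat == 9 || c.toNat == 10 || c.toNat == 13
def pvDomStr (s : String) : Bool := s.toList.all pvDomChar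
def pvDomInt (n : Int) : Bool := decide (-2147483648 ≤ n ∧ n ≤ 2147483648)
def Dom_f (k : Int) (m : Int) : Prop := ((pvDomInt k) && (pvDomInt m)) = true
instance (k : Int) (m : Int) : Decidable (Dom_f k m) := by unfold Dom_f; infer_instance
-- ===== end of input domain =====

-- B is a simpler alternative: it only counts m's digits and applies the closed form
-- k*((m+1)*d - (10^d-1)//9) instead of accumulating each decade's weighted contribution.

-- ===== PORT A =====
-- while x <= m: …  (x starts at 1 and is only multiplied by 10, so 0 < x throughout;
-- the proof argument hx only justifies termination)
def fLoop (k m x s res : Int) (hx : 0 < x) : Int :=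
  if h : x ≤ m then
    fLoop k m (x * 10) (s + 1)
      (if x * 10 - 1 ≤ m then res + k * s * (x * 10 - x) else res + k * s * (m - x + 1))
      (by omega)
  else res
termination_by (m + 1 - x).toNat
decreasing_by omega

def f (k : Int) (m : Int) : Int :=
  fLoop k m 1 1 0 (by omega)

-- ===== PORT B =====
-- while p <= m: d += 1; p *= 10   (p starts at 10; hp only justifies termination)
def fAltLoop (m d p : Int) (hp : 0 < p) : Int × Int :=
  if h : p ≤ m then fAltLoop m (d + 1) (p * 10) (by omega) else (d, p)
termination_by (m + 1 - p).toNat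
decreasing_by omega

def f_alt (k : Int) (m : Int) : Int :=
  if m < 1 then 0
  else
    k * ((m + 1) * (fAltLoop m 1 10 (by omega)).1 -
      PySem.Int.floordiv ((fAltLoop m 1 10 (by omega)).2 - 1) 9)

-- ===== PRECONDITION & SPEC =====
def Spec_f (k : Int) (m : Int) (out : Int) : Prop := out = f_alt k m
instance (k : Int) (m : Int) (out : Int) : Decidable (Spec_f k m out) := by unfold Spec_f; infer_instance

-- ===== CLAIM (what is proved, stated in full; the proofs are below) =====
def Claim_equal_f : Prop := ∀ (k : Int) (m : Int), Dom_f k m → Spec_f k m (f k m)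

-- ===== LEMMAS AND PROOFS =====

-- Unfolding equations for the two loops (the proof argument makes plain `simp [fLoop]` awkward)
theorem fLoop_pos (k m x s res : Int) (hx : 0 < x) (h : x ≤ m) :
    fLoop k m x s res hx =
      fLoop k m (x * 10) (s + 1)
        (if x * 10 - 1 ≤ m then res + k * s * (x * 10 - x) else res + k * s * (m - x + 1))
        (by omega) := by
  rw [fLoop]; simp [h]

theorem fLoop_neg (k m x s res : Int) (hx : 0 < x) (h : ¬ x ≤ m) :
    fLoop k m x s res hx = res := by
  rw [fLoop]; simp [h]

theorem fAltLoop_pos (m d p : Int) (hp : 0 < p) (h : p ≤ m) :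
    fAltLoop m d p hp = fAltLoop m (d + 1) (p * 10) (by omega) := by
  rw [fAltLoop]; simp [h]

theorem fAltLoop_neg (m d p : Int) (hp : 0 < p) (h : ¬ p ≤ m) :
    fAltLoop m d p hp = (d, p) := by
  rw [fAltLoop]; simp [h]

-- The joint loop invariant: if 1 ≤ x ≤ m then A's loop from (x, s, res) returns
-- res + k*(D*(m+1) - s*x - q), where (D, P) = B's digit loop started at (s, 10*x)
-- and 9*q = P - 10*x (so the repunit subtraction is exact).
theorem fLoop_eq (k m : Int) (n : Nat) : ∀ (x s res p : Int) (hx : 0 < x)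
    (hp : 0 < p), p = x * 10 → x ≤ m → (m - x).toNat ≤ n →
    ∃ q : Int, (fAltLoop m s p hp).2 - 10 * x = 9 * q ∧
      fLoop k m x s res hx =
        res + k * ((fAltLoop m s p hp).1 * (m + 1) - s * x - q) := by
  induction n with
  | zero =>
    intro x s res p hx hp hp10 hxm hn
    subst hp10
    have hx10 : ¬ x * 10 ≤ m := by omega
    refine ⟨0, by rw [fAltLoop_neg _ _ _ _ hx10]; ring, ?_⟩
    rw [fLoop_pos _ _ _ _ _ _ hxm, fLoop_neg _ _ _ _ _ _ hx10,
        fAltLoop_neg _ _ _ _ hx10]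
    have hif : ¬ x * 10 - 1 ≤ m := by omega
    rw [if_neg hif]
    have hxm' : x = m := by omega
    subst hxm'
    ring
  | succ n ih =>
    intro x s res p hx hp hp10 hxm hn
    subst hp10
    by_cases hrec : x * 10 ≤ m
    · -- full decade: recurse, using the IH at x' = x*10
      obtain ⟨q', hq', hloop⟩ :=
        ih (x * 10) (s + 1)
          (res + k * s * (x * 10 - x)) (x * 10 * 10) (by omega) (by omega) rfl hrec (by omega)
      refine ⟨q' + 10 * x, ?_, ?_⟩
      · rw [fAltLoop_pos _ _ _ _ hrec]; omega
      · rw [fLoop_pos _ _ _ _ _ _ hxm, if_pos (by omega : x * 10 - 1 ≤ m), hloop,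
            fAltLoop_pos _ _ _ _ hrec]
        ring
    · -- last (possibly partial) decade
      refine ⟨0, by rw [fAltLoop_neg _ _ _ _ hrec]; ring, ?_⟩
      rw [fLoop_pos _ _ _ _ _ _ hxm, fLoop_neg _ _ _ _ _ _ hrec,
          fAltLoop_neg _ _ _ _ hrec]
      by_cases hif : x * 10 - 1 ≤ m
      · rw [if_pos hif]
        have : x * 10 - 1 = m := by omega
        rw [← this]; ring
      · rw [if_neg hif]; ring

theorem f_spec : Claim_equal_f := by
  intro k m _
  unfold Spec_f f f_alt
  by_cases hm : m < 1
  · rw [fLoop_neg _ _ _ _ _ _ (by omega : ¬ (1 : Int) ≤ m), if_pos hm]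
  · have hm : 1 ≤ m := by omega
    obtain ⟨q, hq, hloop⟩ :=
      fLoop_eq k m (m - 1).toNat 1 1 0 10 (by omega) (by omega) (by norm_num) hm (by omega)
    rw [hloop, if_neg (by omega : ¬ m < 1)]
    have hdiv : PySem.Int.floordiv ((fAltLoop m 1 10 (by omega)).2 - 1) 9 = q + 1 := by
      have h2 : (fAltLoop m 1 10 (by omega)).2 - 1 = 9 * (q + 1) := by omega
      rw [h2, PySem.Int.floordiv_eq_ediv_of_pos (by omega)]
      omega
    rw [hdiv]
    ring
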